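-- pv_equiv track=rewrite | github.com/normbernardi/code_repo | Python/Numerology/upto_n2.py | upto_n
-- ===== SOURCE A (Python) =====
-- def end_of_line(n: int) -> bool:
--     r = 1
--     while (r * (r + 1)) // 2 < n:
--         r += 1
--     return n == (r * (r + 1)) // 2
--
-- def upto_n(n: int) -> str:
--     CRLF = "\n"
--     output = ""
--     for i in range(1, n):
--         item = f'{i:4}'
--         if end_of_line(i):
--             item += CRLF
--         output += item
--     output += f'{n:4}' + CRLF + "**" + CRLF
--     return output
-- ===== SOURCE B (Python) =====
-- def upto_n(n: int) -> str:
--     output = ""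
--     t, k = 1, 1  # t = next triangular number, t = k*(k+1)//2
--     for i in range(1, n):
--         output += f'{i:4}'
--         if i == t:
--             output += '\n'
--             k += 1
--             t += k
--     return output + f'{n:4}' + '\n**\n'
-- ===== Notes on version B (the rewrite author's own statement) =====
-- stated objective: faster
-- what changed: B drops the helper end_of_line (which re-searches the triangular sequence from r=1 for every i) and instead carries the next triangular number t = k*(k+1)//2 as running state through a single pass, advancing it only when i hits it.
import Mathlib
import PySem

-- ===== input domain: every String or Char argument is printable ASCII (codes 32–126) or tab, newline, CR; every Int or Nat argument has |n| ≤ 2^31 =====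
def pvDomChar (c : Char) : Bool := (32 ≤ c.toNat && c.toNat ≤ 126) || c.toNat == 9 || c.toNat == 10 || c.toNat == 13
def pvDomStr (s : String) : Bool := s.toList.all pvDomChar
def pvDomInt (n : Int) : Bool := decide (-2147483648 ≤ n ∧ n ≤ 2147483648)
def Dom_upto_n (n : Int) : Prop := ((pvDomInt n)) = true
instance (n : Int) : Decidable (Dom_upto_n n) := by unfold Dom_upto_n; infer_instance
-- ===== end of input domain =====

-- B replaces A's per-element triangular-number search (inner while loop) by a running
-- next-triangular pointer advanced with the single pass: O(n) instead of O(n·√n); measurably faster.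

-- f'{i:4}': str(i) right-justified with spaces to width 4 (exact: Python pads with spaces on the left)
def pyFmt4 (i : Int) : String :=
  String.ofList (List.replicate (4 - (PySem.Int.toChars i).length) ' ' ++ PySem.Int.toChars i)

-- ===== PORT A =====
-- termination helper for A's while loop: r ≤ r*(r+1)//2
theorem pvTriGe (r : Int) : r ≤ PySem.Int.floordiv (r * (r + 1)) 2 := by
  rw [(PySem.Int.le_floordiv_iff_mul_le (by omega) : r ≤ _ ↔ _)]
  by_cases h : r ≤ 0
  · nlinarith
  · nlinarith

def endOfLineLoop (n : Int) (r : Int) : Int :=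
  if PySem.Int.floordiv (r * (r + 1)) 2 < n then endOfLineLoop n (r + 1) else r
termination_by (n - r).toNat
decreasing_by
  have := pvTriGe r
  omega

def end_of_line (n : Int) : Bool :=
  let r := endOfLineLoop n 1
  n == PySem.Int.floordiv (r * (r + 1)) 2

def upto_n (n : Int) : String :=
  let output := (PySem.List.pyRange 1 n 1).foldl
    (fun output i =>
      let item := pyFmt4 i
      let item := if end_of_line i then item ++ "\n" else item
      output ++ item) ""
  output ++ pyFmt4 n ++ "\n" ++ "**" ++ "\n"

-- ===== PORT B =====
def upto_n_alt (n : Int) : String :=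
  let s := (PySem.List.pyRange 1 n 1).foldl
    (fun (s : String × Int × Int) i =>
      let output := s.1 ++ pyFmt4 i
      if i == s.2.1 then (output ++ "\n", s.2.1 + (s.2.2 + 1), s.2.2 + 1)
      else (output, s.2.1, s.2.2))
    ("", 1, 1)
  s.1 ++ pyFmt4 n ++ "\n**\n"

-- ===== PRECONDITION & SPEC =====
def Spec_upto_n (n : Int) (out : String) : Prop := out = upto_n_alt n
instance (n : Int) (out : String) : Decidable (Spec_upto_n n out) := by unfold Spec_upto_n; infer_instance

-- ===== CLAIM (what is proved, stated in full; the proofs are below) =====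
def Claim_equal_upto_n : Prop := ∀ (n : Int), Dom_upto_n n → Spec_upto_n n (upto_n n)

-- ===== LEMMAS AND PROOFS =====

-- tri K = K*(K+1)//2, the K-th triangular number
def tri (K : Int) : Int := PySem.Int.floordiv (K * (K + 1)) 2

theorem two_mul_tri (K : Int) : 2 * tri K = K * (K + 1) := by
  have hdvd : (2 : Int) ∣ K * (K + 1) := (Int.even_mul_succ_self K).two_dvd
  have := Int.ediv_mul_cancel hdvd
  unfold tri
  rw [PySem.Int.floordiv_eq_ediv_of_pos (by omega)]
  omega

theorem tri_mono {a b : Int} (h0 : 0 ≤ a) (h : a ≤ b) : tri a ≤ tri b := by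
  have ha := two_mul_tri a
  have hb := two_mul_tri b
  nlinarith

theorem tri_succ (K : Int) : tri (K + 1) = tri K + (K + 1) := by
  have h1 := two_mul_tri K
  have h2 := two_mul_tri (K + 1)
  nlinarith

theorem endOfLineLoop_eq (i : Int) : ∀ (r K : Int), 1 ≤ r → r ≤ K →
    tri (K - 1) < i → i ≤ tri K → endOfLineLoop i r = K := by
  intro r K hr hrK hlo hhi
  induction hm : (K - r).toNat generalizing r with
  | zero =>
    have : r = K := by omega
    subst this
    unfold endOfLineLoop
    exact if_neg (not_lt.mpr hhi)
  | succ m ih =>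
    have hrK' : r < K := by omega
    have hcond : PySem.Int.floordiv (r * (r + 1)) 2 < i :=
      lt_of_le_of_lt (tri_mono (by omega) (by omega)) hlo
    unfold endOfLineLoop
    rw [if_pos hcond]
    exact ih (r + 1) (by omega) (by omega) (by omega)

theorem eol_iff {K i : Int} (hK : 1 ≤ K) (hlo : tri (K - 1) < i) (hhi : i ≤ tri K) :
    end_of_line i = (i == tri K) := by
  unfold end_of_line
  rw [endOfLineLoop_eq i 1 K le_rfl hK hlo hhi]
  rfl

theorem fold_eq (n : Int) : ∀ (i K : Int) (out : String), 1 ≤ K →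
    tri (K - 1) < i → i ≤ tri K →
    ((PySem.List.pyRange i n 1).foldl
      (fun (s : String × Int × Int) j =>
        let output := s.1 ++ pyFmt4 j
        if j == s.2.1 then (output ++ "\n", s.2.1 + (s.2.2 + 1), s.2.2 + 1)
        else (output, s.2.1, s.2.2)) (out, tri K, K)).1
    = (PySem.List.pyRange i n 1).foldl
      (fun output j =>
        let item := pyFmt4 j
        let item := if end_of_line j then item ++ "\n" else item
        output ++ item) out := by
  intro i K out hK hlo hhi
  induction hm : (n - i).toNat generalizing i K out with
  | zero =>
    rw [PySem.List.pyRange_one_eq_nil (by omega)]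
    rfl
  | succ m ih =>
    have hin : i < n := by omega
    rw [PySem.List.pyRange_one_cons hin]
    simp only [List.foldl_cons]
    have heol := eol_iff hK hlo hhi
    by_cases hit : i = tri K
    · have hbeq : (i == tri K) = true := by simp [hit]
      simp only [heol, hbeq, if_pos]
      have hstep : tri K + (K + 1) = tri (K + 1) := by
        have := tri_succ K
        omega
      rw [hstep, ← String.append_assoc]
      exact ih (i + 1) (K + 1) _ (by omega)
        (by rw [show K + 1 - 1 = K by ring]; omega)
        (by rw [tri_succ]; omega) (by omega)
    · have hbeq : (i == tri K) = false := by simp [hit]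
      simp only [heol, hbeq, if_false, Bool.false_eq_true]
      exact ih (i + 1) K _ hK (by omega)
        (by have := hhi; omega) (by omega)

-- ===== VERDICT (by name: the statement is the Claim_ definition above) =====
theorem upto_n_spec : Claim_equal_upto_n := by
  intro n _
  unfold Spec_upto_n upto_n upto_n_alt
  have h := fold_eq n 1 1 "" le_rfl (by decide) (by decide)
  have htri : tri 1 = 1 := by decide
  rw [htri] at h
  dsimp only
  rw [h, String.append_assoc, String.append_assoc, String.append_assoc,
    show ("\n" : String) ++ ("**" ++ "\n") = "\n**\n" from rfl,
    ← String.append_assoc]
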